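-- pv_equiv track=rewrite | github.com/Dragooz/LeetCode_Solutions | Weekly Contest 189/1451. Rearrange Words in a Sentence.py | arrangeWords
-- ===== SOURCE A (Python) =====
-- def arrangeWords(text: str) -> str:
--
--     splitted = text.split(' ')
--
--     arr = sorted([(len(word), index) for index, word in enumerate(splitted)])
--
--     ans = []
--
--     for index, (i, j) in enumerate(arr):
--         if index == 0:
--             ans.append(splitted[j].capitalize())
--         else:
--             ans.append(splitted[j].lower())
--
--     return ' '.join(ans)
-- ===== SOURCE B (Python) =====
-- def arrangeWords(text: str) -> str:
--     words = text.split(' ')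
--     maxlen = 0
--     for w in words:
--         if len(w) > maxlen:
--             maxlen = len(w)
--     buckets = [[] for _ in range(maxlen + 1)]
--     for w in words:
--         buckets[len(w)].append(w)
--     out = []
--     first = True
--     for bucket in buckets:
--         for w in bucket:
--             out.append(w.capitalize() if first else w.lower())
--             first = False
--     return ' '.join(out)
-- ===== Notes on version B (the rewrite author's own statement) =====
-- stated objective: alternative
-- what changed: A builds (len, index) tuples and comparison-sorts them before relabeling; B scatters the words into length-indexed buckets and gathers them in increasing length (a stable counting/bucket sort), capitalizing the first emitted word and lowercasing the rest.
import Mathlib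
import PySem

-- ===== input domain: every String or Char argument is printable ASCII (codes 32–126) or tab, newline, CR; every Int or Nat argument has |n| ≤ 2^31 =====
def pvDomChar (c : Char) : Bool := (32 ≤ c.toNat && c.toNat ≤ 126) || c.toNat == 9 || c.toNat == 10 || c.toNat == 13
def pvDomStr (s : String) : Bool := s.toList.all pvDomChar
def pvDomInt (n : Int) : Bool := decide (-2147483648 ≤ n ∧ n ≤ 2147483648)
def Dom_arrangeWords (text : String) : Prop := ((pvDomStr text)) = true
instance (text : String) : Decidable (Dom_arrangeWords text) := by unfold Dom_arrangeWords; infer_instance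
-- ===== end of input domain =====

-- B replaces A's comparison sort of (len, index) tuples by a counting/bucket sort over word lengths (objective: alternative).

-- ===== PORT A =====
-- Python str.capitalize(): first character uppercased, the rest lowercased (exact on ASCII; both Pythons call it)
def pyCapitalize (cs : List Char) : List Char :=
  match cs with
  | [] => []
  | c :: rest => PySem.Chars.upperChar c :: PySem.Chars.lower rest

def arrangeWordsA (cs : List Char) : List Char :=
  let splitted := PySem.Chars.splitOn cs [' ']
  let arr := PySem.List.sorted2
      ((PySem.List.enumerate splitted).map (fun p => (PySem.Chars.len p.2, p.1)))
      (fun q => q.1) (fun q => q.2)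
  let ans := (PySem.List.enumerate arr).foldl
      (fun ans p =>
        if p.1 == 0 then ans ++ [pyCapitalize (PySem.List.pyGetD splitted p.2.2 [])]
        else ans ++ [PySem.Chars.lower (PySem.List.pyGetD splitted p.2.2 [])]) []
  PySem.Chars.join [' '] ans

def arrangeWords (text : String) : String := String.ofList (arrangeWordsA text.toList)

-- ===== PORT B =====
def arrangeWordsB (cs : List Char) : List Char :=
  let words := PySem.Chars.splitOn cs [' ']
  let maxlen := words.foldl (fun m w => if w.length > m then w.length else m) 0
  -- buckets[len(w)].append(w): in-place update of the bucket list at index len(w) (always in range)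
  let buckets := words.foldl
      (fun bs w => bs.set w.length (bs.getD w.length [] ++ [w]))
      (List.replicate (maxlen + 1) ([] : List (List Char)))
  let st := buckets.foldl
      (fun st bucket => bucket.foldl
        (fun (st : List (List Char) × Bool) w =>
          (st.1 ++ [if st.2 then pyCapitalize w else PySem.Chars.lower w], false)) st)
      (([] : List (List Char)), true)
  PySem.Chars.join [' '] st.1

def arrangeWords_alt (text : String) : String := String.ofList (arrangeWordsB text.toList)

-- ===== PRECONDITION & SPEC =====
def Spec_arrangeWords (text : String) (out : String) : Prop := out = arrangeWords_alt text
instance (text : String) (out : String) : Decidable (Spec_arrangeWords text out) := by unfold Spec_arrangeWords; infer_instance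

-- ===== CLAIM (what is proved, stated in full; the proofs are below) =====
def Claim_equal_arrangeWords : Prop := ∀ (text : String), Dom_arrangeWords text → Spec_arrangeWords text (arrangeWords text)

-- ===== LEMMAS AND PROOFS =====

-- the bucket arrangement of a list of (length, index) pairs, gathered by length L = 0..n-1
def pvBuckets (Q : List (Int × Int)) (n : Nat) : List (Int × Int) :=
  (List.range n).flatMap (fun (L : Nat) => Q.filter (fun q => decide (q.1 = (L : Int))))

-- ---- A's output loop ----
theorem pvLoopA_tail (splitted : List (List Char)) (arr : List (Int × Int)) :
    ∀ (s : Int) (acc : List (List Char)), 1 ≤ s →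
    (PySem.List.enumerate arr s).foldl
      (fun ans p =>
        if p.1 == 0 then ans ++ [pyCapitalize (PySem.List.pyGetD splitted p.2.2 [])]
        else ans ++ [PySem.Chars.lower (PySem.List.pyGetD splitted p.2.2 [])]) acc
    = acc ++ arr.map (fun q => PySem.Chars.lower (PySem.List.pyGetD splitted q.2 [])) := by
  induction arr with
  | nil => intro s acc hs; simp [PySem.List.enumerate_nil]
  | cons q rest ih =>
    intro s acc hs
    rw [PySem.List.enumerate_cons]
    have h0 : (s == 0) = false := by simp; omega
    simp only [List.foldl_cons, h0, if_neg Bool.false_ne_true]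
    rw [ih (s + 1) _ (by omega)]
    simp

theorem pvLoopA (splitted : List (List Char)) (arr : List (Int × Int)) :
    (PySem.List.enumerate arr).foldl
      (fun ans p =>
        if p.1 == 0 then ans ++ [pyCapitalize (PySem.List.pyGetD splitted p.2.2 [])]
        else ans ++ [PySem.Chars.lower (PySem.List.pyGetD splitted p.2.2 [])]) []
    = match arr with
      | [] => []
      | q :: rest => pyCapitalize (PySem.List.pyGetD splitted q.2 [])
          :: rest.map (fun q => PySem.Chars.lower (PySem.List.pyGetD splitted q.2 [])) := by
  cases arr with
  | nil => simp [PySem.List.enumerate_nil]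
  | cons q rest =>
    rw [PySem.List.enumerate_cons]
    simp only [List.foldl_cons]
    rw [pvLoopA_tail splitted rest (0 + 1) _ (by omega)]
    simp

-- ---- B's output loop ----
theorem pvLoopB_false (g : List (List Char)) :
    ∀ (out : List (List Char)),
    g.foldl (fun (st : List (List Char) × Bool) w =>
        (st.1 ++ [if st.2 then pyCapitalize w else PySem.Chars.lower w], false)) (out, false)
    = (out ++ g.map PySem.Chars.lower, false) := by
  induction g with
  | nil => intro out; simp
  | cons w rest ih => intro out; simp only [List.foldl_cons, ih]; simp

theorem pvLoopB (g : List (List Char)) :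
    (g.foldl (fun (st : List (List Char) × Bool) w =>
        (st.1 ++ [if st.2 then pyCapitalize w else PySem.Chars.lower w], false)) ([], true)).1
    = match g with
      | [] => []
      | w :: rest => pyCapitalize w :: rest.map PySem.Chars.lower := by
  cases g with
  | nil => simp
  | cons w rest => simp only [List.foldl_cons, if_pos]; rw [pvLoopB_false]; simp

-- ---- B's bucket construction ----
theorem pvBuckets_fold (ws : List (List Char)) (n : Nat) :
    ∀ (g : Nat → List (List Char)), (∀ w ∈ ws, w.length < n) →
    ws.foldl (fun bs w => bs.set w.length (bs.getD w.length [] ++ [w])) ((List.range n).map g)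
    = (List.range n).map (fun L => g L ++ ws.filter (fun w => decide (w.length = L))) := by
  induction ws with
  | nil => intro g _; simp
  | cons w rest ih =>
    intro g hb
    have hw : w.length < n := hb w (by simp)
    have hset : ((List.range n).map g).set w.length (((List.range n).map g).getD w.length [] ++ [w])
        = (List.range n).map (fun L => if L = w.length then g L ++ [w] else g L) := by
      apply List.ext_getElem
      · simp
      · intro i h1 h2
        have hi : i < n := by simpa using h2
        have hgetD : ((List.range n).map g).getD w.length [] = g w.length := by
          rw [List.getD_eq_getElem _ _ (by simpa using hw)]
          simp
        rw [List.getElem_set]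
        simp [List.getElem_map, List.getElem_range]
        rcases eq_or_ne (w.length) i with h | h
        · simp [h, List.getElem?_range hi]
        · simp [h, Ne.symm h]
    rw [List.foldl_cons, hset, ih _ (fun w hw => hb w (by simp [hw]))]
    apply List.map_congr_left
    intro L hL
    by_cases h : w.length = L <;> simp [h, Ne.symm]

-- ---- sorted2 on (len, index) tuples is the bucket arrangement ----
theorem pvSorted2_lex (xs : List (Int × Int)) :
    PySem.List.sorted2 xs (fun q => q.1) (fun q => q.2)
    = PySem.List.sorted xs (fun q => toLex (q.1, q.2)) := by
  simp only [PySem.List.sorted2, PySem.List.sorted, Bool.false_eq_true, if_false]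
  have : (fun (a b : Int × Int) => decide (a.1 < b.1) || (!decide (b.1 < a.1) && decide (a.2 < b.2)))
      = (fun (a b : Int × Int) => decide ((toLex (a.1, a.2) : Lex (Int × Int)) < toLex (b.1, b.2))) := by
    funext a b
    simp only [Prod.Lex.lt_iff]
    by_cases h1 : a.1 < b.1 <;> by_cases h2 : b.1 < a.1 <;> by_cases h3 : a.2 < b.2 <;>
      simp [h1, h2, h3] <;> omega
  rw [this]

theorem pvSum_ite_range (n : Nat) (v : Int) (c : Nat) :
    ((List.range n).map (fun (L : Nat) => if v = (L : Int) then c else 0)).sum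
    = if 0 ≤ v ∧ v < (n : Int) then c else 0 := by
  induction n with
  | zero => simp
  | succ m ih =>
    rw [List.range_succ]
    simp only [List.map_append, List.sum_append, ih, List.map_cons, List.map_nil, List.sum_cons,
      List.sum_nil]
    by_cases h2 : v = (m : Int)
    · simp [h2]
    · by_cases h1 : 0 ≤ v ∧ v < (m : Int)
      · simp [h1, h2]
        omega
      · simp [h1, h2]
        omega

theorem pvPerm_buckets (Q : List (Int × Int)) (n : Nat)
    (h : ∀ q ∈ Q, 0 ≤ q.1 ∧ q.1 < (n : Int)) : (pvBuckets Q n).Perm Q := by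
  rw [List.perm_iff_count]
  intro a
  rw [pvBuckets, List.flatMap_def, List.count_flatten, List.map_map]
  have hmap : ((List.range n).map
        (List.count a ∘ fun (L : Nat) => Q.filter (fun q => decide (q.1 = (L : Int)))))
      = (List.range n).map (fun (L : Nat) => if a.1 = (L : Int) then List.count a Q else 0) := by
    apply List.map_congr_left
    intro L _
    simp only [Function.comp]
    by_cases hL : a.1 = (L : Int)
    · rw [List.count_filter (by simp [hL])]; simp [hL]
    · have hmem : a ∉ Q.filter (fun q => decide (q.1 = (L : Int))) := by
        simp [List.mem_filter, hL]
      simp [List.count_eq_zero.mpr hmem, hL]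
  rw [hmap, pvSum_ite_range]
  by_cases ha : a ∈ Q
  · simp [h a ha]
  · simp [List.count_eq_zero.mpr ha]

theorem pvPairwise_buckets (Q : List (Int × Int)) (n : Nat)
    (hs : Q.Pairwise (fun a b => a.2 < b.2)) :
    (pvBuckets Q n).Pairwise
      (fun a b => (toLex (a.1, a.2) : Lex (Int × Int)) < toLex (b.1, b.2)) := by
  rw [pvBuckets, List.flatMap_def, List.pairwise_flatten]
  constructor
  · intro l hl
    rw [List.mem_map] at hl
    obtain ⟨L, _, rfl⟩ := hl
    refine (hs.filter _).imp_of_mem ?_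
    intro a b ha hb hab
    have ha1 : a.1 = (L : Int) := by simpa using List.of_mem_filter ha
    have hb1 : b.1 = (L : Int) := by simpa using List.of_mem_filter hb
    rw [Prod.Lex.lt_iff]
    right
    constructor
    · simpa using ha1.trans hb1.symm
    · simpa using hab
  · refine List.pairwise_map.mpr (List.pairwise_lt_range.imp_of_mem ?_)
    intro L1 L2 _ _ hlt a ha b hb
    have ha1 : a.1 = (L1 : Int) := by simpa using List.of_mem_filter ha
    have hb1 : b.1 = (L2 : Int) := by simpa using List.of_mem_filter hb
    rw [Prod.Lex.lt_iff]
    left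
    simp only [ofLex_toLex]
    rw [ha1, hb1]
    exact_mod_cast hlt

theorem pvArr_eq (Q : List (Int × Int)) (n : Nat)
    (h : ∀ q ∈ Q, 0 ≤ q.1 ∧ q.1 < (n : Int))
    (hs : Q.Pairwise (fun a b => a.2 < b.2)) :
    PySem.List.sorted2 Q (fun q => q.1) (fun q => q.2) = pvBuckets Q n := by
  rw [pvSorted2_lex]
  exact PySem.List.sorted_eq_of_perm_of_pairwise_lt Q (pvBuckets Q n)
    (fun q => toLex (q.1, q.2)) (pvPerm_buckets Q n h) (pvPairwise_buckets Q n hs)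

-- indices recovered through pyGetD give back the enumerated words
theorem pvGetD_enumerate (xs : List (List Char)) (p : Int × List Char)
    (hp : p ∈ PySem.List.enumerate xs) : PySem.List.pyGetD xs p.1 [] = p.2 := by
  rw [PySem.List.mem_enumerate_iff] at hp
  obtain ⟨k, hk, rfl⟩ := hp
  simp [PySem.List.pyGetD_natCast, List.getElem?_eq_getElem hk]

-- the word list A reads off the sorted pairs = B's gathered bucket contents
theorem pvWords_eq (ws : List (List Char)) (n : Nat) :
    (pvBuckets ((PySem.List.enumerate ws).map (fun p => (PySem.Chars.len p.2, p.1))) n).map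
        (fun q => PySem.List.pyGetD ws q.2 [])
    = (List.range n).flatMap (fun (L : Nat) => ws.filter (fun w => decide (w.length = L))) := by
  rw [pvBuckets, List.map_flatMap]
  apply List.flatMap_congr
  intro L _
  rw [List.filter_map, List.map_map]
  have h1 : ((PySem.List.enumerate ws).filter
        ((fun q => decide (q.1 = (L : Int))) ∘ (fun p => (PySem.Chars.len p.2, p.1)))).map
        ((fun q => PySem.List.pyGetD ws q.2 []) ∘ (fun p => (PySem.Chars.len p.2, p.1)))
      = ((PySem.List.enumerate ws).filter
        ((fun q => decide (q.1 = (L : Int))) ∘ (fun p => (PySem.Chars.len p.2, p.1)))).map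
        (fun p => p.2) := by
    apply List.map_congr_left
    intro p hp
    simpa using pvGetD_enumerate ws p (List.mem_of_mem_filter hp)
  rw [h1]
  have h2 : ((fun q => decide (q.1 = (L : Int))) ∘ (fun (p : Int × List Char) => (PySem.Chars.len p.2, p.1)))
      = ((fun w => decide (w.length = L)) ∘ (fun (p : Int × List Char) => p.2)) := by
    funext p
    simp [PySem.Chars.len_eq]
  rw [h2, ← List.filter_map, PySem.List.map_snd_enumerate]

theorem pvAB (cs : List Char) : arrangeWordsA cs = arrangeWordsB cs := by
  simp only [arrangeWordsA, arrangeWordsB]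
  set ws := PySem.Chars.splitOn cs [' '] with hws
  set m := ws.foldl (fun m w => if w.length > m then w.length else m) 0 with hm
  -- the max loop is a fold of Nat.max
  have hfun : (fun (m : Nat) (w : List Char) => if w.length > m then w.length else m)
      = (fun (m : Nat) (w : List Char) => max m w.length) := by
    funext m w
    by_cases h : w.length > m <;> simp [h] <;> omega
  have hmax : ∀ w ∈ ws, w.length < m + 1 := by
    intro w hw
    have := (PySem.List.le_foldl_max_nat ws List.length 0).2 w hw
    rw [hm, hfun]
    omega
  -- B's buckets hold the words grouped by length, in original order
  have hrepl : (List.replicate (m + 1) ([] : List (List Char)))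
      = (List.range (m + 1)).map (fun _ => []) := by
    rw [List.map_const', List.length_range]
  have hbuckets : ws.foldl (fun bs w => bs.set w.length (bs.getD w.length [] ++ [w]))
        (List.replicate (m + 1) ([] : List (List Char)))
      = (List.range (m + 1)).map (fun L => ws.filter (fun w => decide (w.length = L))) := by
    rw [hrepl, pvBuckets_fold ws (m + 1) _ hmax]
    simp
  rw [hbuckets, ← List.foldl_flatten, pvLoopB, ← List.flatMap_def]
  -- A's sorted pair list is the bucket arrangement of the (len, index) pairs
  set Q := ((PySem.List.enumerate ws).map (fun p => (PySem.Chars.len p.2, p.1))) with hQ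
  have hQb : ∀ q ∈ Q, 0 ≤ q.1 ∧ q.1 < ((m + 1 : Nat) : Int) := by
    intro q hq
    rw [hQ, List.mem_map] at hq
    obtain ⟨p, hp, rfl⟩ := hq
    rw [PySem.List.mem_enumerate_iff] at hp
    obtain ⟨k, hk, rfl⟩ := hp
    have := hmax _ (List.getElem_mem hk)
    simp [PySem.Chars.len_eq]
    omega
  have hQp : Q.Pairwise (fun a b => a.2 < b.2) := by
    rw [hQ]
    exact List.pairwise_map.mpr (PySem.List.pairwise_lt_enumerate ws 0)
  rw [pvArr_eq Q (m + 1) hQb hQp, pvLoopA]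
  -- align the two word sequences
  have hwords := pvWords_eq ws (m + 1)
  rw [← hQ] at hwords
  cases hbk : pvBuckets Q (m + 1) with
  | nil =>
    rw [hbk] at hwords
    simp only [List.map_nil] at hwords
    rw [← hwords]
  | cons q rest =>
    rw [hbk] at hwords
    simp only [List.map_cons] at hwords
    rw [← hwords]
    congr 1
    simp only [List.map_map, Function.comp_def]

-- ===== VERDICT (by name: the statement is the Claim_ definition above) =====
theorem arrangeWords_spec : Claim_equal_arrangeWords := by
  intro text _
  unfold Spec_arrangeWords arrangeWords arrangeWords_alt
  rw [pvAB]
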